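-- pv_equiv track=rewrite | github.com/dmedlin87/Theoria | theo/domain/discoveries/contradiction_engine.py | _infer_contradiction_type
-- ===== SOURCE A (Python) =====
-- def _infer_contradiction_type(shared_topics: set[str]) -> str:
--     """Infer the type of contradiction based on shared topics."""
--     # Normalize topics to lowercase for matching
--     topics_lower = {t.lower() for t in shared_topics}
--
--     # Theological contradictions
--     theological_keywords = {
--         "christology",
--         "soteriology",
--         "ecclesiology",
--         "eschatology",
--         "pneumatology",
--         "theology",
--         "doctrine",
--         "trinity",
--         "salvation",
--     }
--     if topics_lower & theological_keywords:
--         return "theological"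
--
--     # Historical contradictions
--     historical_keywords = {
--         "history",
--         "historical",
--         "chronology",
--         "date",
--         "event",
--         "timeline",
--     }
--     if topics_lower & historical_keywords:
--         return "historical"
--
--     # Textual contradictions
--     textual_keywords = {
--         "textual",
--         "manuscript",
--         "variant",
--         "translation",
--         "text",
--         "criticism",
--     }
--     if topics_lower & textual_keywords:
--         return "textual"
--
--     # Default to logical
--     return "logical"
-- ===== SOURCE B (Python) =====
-- _TYPES = ("theological", "historical", "textual", "logical")
--
-- _RANK = {
--     kw: rank
--     for rank, kws in enumerate((
--         ("christology", "soteriology", "ecclesiology", "eschatology",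
--          "pneumatology", "theology", "doctrine", "trinity", "salvation"),
--         ("history", "historical", "chronology", "date", "event", "timeline"),
--         ("textual", "manuscript", "variant", "translation", "text", "criticism"),
--     ))
--     for kw in kws
-- }
--
--
-- def _infer_contradiction_type(shared_topics: set[str]) -> str:
--     """Infer the type of contradiction based on shared topics."""
--     best = 3
--     for t in shared_topics:
--         best = min(best, _RANK.get(t.lower(), 3))
--     return _TYPES[best]
-- ===== Notes on version B (the rewrite author's own statement) =====
-- stated objective: simpler
-- what changed: Replaces the three ordered set-intersections with one module-level keyword-to-priority-rank dict and a single pass over the topics tracking the minimum rank, indexing a type table at the end.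
import Mathlib
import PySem

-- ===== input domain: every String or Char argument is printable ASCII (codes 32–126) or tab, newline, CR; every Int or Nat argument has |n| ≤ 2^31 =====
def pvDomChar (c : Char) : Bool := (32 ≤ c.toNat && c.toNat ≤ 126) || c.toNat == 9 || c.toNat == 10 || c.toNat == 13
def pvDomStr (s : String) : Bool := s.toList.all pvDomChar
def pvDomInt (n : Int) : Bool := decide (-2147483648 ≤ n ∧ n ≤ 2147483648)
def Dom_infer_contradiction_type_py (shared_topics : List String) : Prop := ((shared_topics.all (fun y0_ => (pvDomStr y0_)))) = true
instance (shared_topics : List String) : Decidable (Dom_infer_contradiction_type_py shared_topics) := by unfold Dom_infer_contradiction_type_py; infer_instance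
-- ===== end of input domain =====

-- B replaces A's three ordered set-intersections with one keyword→rank dict and a single
-- min-rank pass over the topics (objective: simpler).

-- shared keyword data (identical literals in both Pythons)
def pvTheoKws : List String :=
  ["christology", "soteriology", "ecclesiology", "eschatology",
   "pneumatology", "theology", "doctrine", "trinity", "salvation"]

def pvHistKws : List String :=
  ["history", "historical", "chronology", "date", "event", "timeline"]

def pvTextKws : List String :=
  ["textual", "manuscript", "variant", "translation", "text", "criticism"]

-- ===== PORT A =====
def infer_contradiction_type_py (shared_topics : List String) : String :=
  let topics_lower : PySem.Set String :=
    PySem.Set.ofList (shared_topics.map PySem.Str.lower)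
  if PySem.Set.inter topics_lower (PySem.Set.ofList pvTheoKws) ≠ [] then "theological"
  else if PySem.Set.inter topics_lower (PySem.Set.ofList pvHistKws) ≠ [] then "historical"
  else if PySem.Set.inter topics_lower (PySem.Set.ofList pvTextKws) ≠ [] then "textual"
  else "logical"

-- ===== PORT B =====
def pvTypes : List String := ["theological", "historical", "textual", "logical"]

-- the dict comprehension {kw: rank for rank, kws in enumerate(…) for kw in kws}
def pvRank : PySem.Dict String Int :=
  PySem.Dict.ofList
    (pvTheoKws.map (fun kw => (kw, 0)) ++ pvHistKws.map (fun kw => (kw, 1))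
      ++ pvTextKws.map (fun kw => (kw, 2)))

def infer_contradiction_type_py_alt (shared_topics : List String) : String :=
  let best : Int :=
    shared_topics.foldl (fun best t => min best (pvRank.getD (PySem.Str.lower t) 3)) 3
  PySem.List.pyGetD pvTypes best "logical"

-- ===== PRECONDITION & SPEC =====
def Spec_infer_contradiction_type_py (shared_topics : List String) (out : String) : Prop := out = infer_contradiction_type_py_alt shared_topics
instance (shared_topics : List String) (out : String) : Decidable (Spec_infer_contradiction_type_py shared_topics out) := by unfold Spec_infer_contradiction_type_py; infer_instance

-- ===== CLAIM (what is proved, stated in full; the proofs are below) =====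
def Claim_equal_infer_contradiction_type_py : Prop := ∀ (shared_topics : List String), Dom_infer_contradiction_type_py shared_topics → Spec_infer_contradiction_type_py shared_topics (infer_contradiction_type_py shared_topics)

-- ===== LEMMAS AND PROOFS =====

-- find? over a constant-valued keyed block
theorem pv_find?_block (s : String) (v : Int) (xs : List String) (rest : List (String × Int)) :
    List.find? (fun p => p.1 == s) (xs.map (fun k => (k, v)) ++ rest)
      = if s ∈ xs then some (s, v) else List.find? (fun p => p.1 == s) rest := by
  induction xs with
  | nil => simp
  | cons k xs ih =>
    by_cases h : k = s
    · simp [h]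
    · have hs : ¬ s = k := fun hs => h hs.symm
      simp [beq_iff_eq, h, ih, hs]

theorem pvRank_eq_mk :
    pvRank = PySem.Dict.mk
      (pvTheoKws.map (fun kw => (kw, 0)) ++ pvHistKws.map (fun kw => (kw, 1))
        ++ pvTextKws.map (fun kw => (kw, 2))) := by
  decide

-- rank of a string as nested membership tests on the three keyword lists
theorem pvRank_getD (s : String) :
    pvRank.getD s 3 =
      if s ∈ pvTheoKws then 0
      else if s ∈ pvHistKws then 1
      else if s ∈ pvTextKws then 2
      else 3 := by
  rw [pvRank_eq_mk, PySem.Dict.getD_eq_get?_getD]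
  have hget : ∀ (l : List (String × Int)),
      (PySem.Dict.mk l).get? s = Option.map (fun p => p.2) (List.find? (fun p => p.1 == s) l) := by
    intro l; simp [PySem.Dict.get?]
  rw [hget, List.append_assoc, pv_find?_block, pv_find?_block,
    ← List.append_nil (pvTextKws.map (fun kw => (kw, (2 : Int)))), pv_find?_block]
  split_ifs <;> rfl

theorem pvRank_nonneg (s : String) : 0 ≤ pvRank.getD s 3 := by
  rw [pvRank_getD]; split_ifs <;> norm_num

theorem pvRank_le_three (s : String) : pvRank.getD s 3 ≤ 3 := by
  rw [pvRank_getD]; split_ifs <;> norm_num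

-- the fold with accumulator b ≤ 3 is min b (fold from 3)
theorem pv_fold_min (L : List String) : ∀ (b : Int), b ≤ 3 →
    L.foldl (fun best t => min best (pvRank.getD (PySem.Str.lower t) 3)) b
      = min b (L.foldl (fun best t => min best (pvRank.getD (PySem.Str.lower t) 3)) 3) := by
  induction L with
  | nil => intro b hb; simp [min_eq_left hb]
  | cons t L ih =>
    intro b hb
    have hr := pvRank_le_three (PySem.Str.lower t)
    rw [List.foldl_cons, List.foldl_cons,
      ih (min b (pvRank.getD (PySem.Str.lower t) 3)) (by omega),
      ih (min 3 (pvRank.getD (PySem.Str.lower t) 3)) (by omega)]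
    omega

theorem pv_fold_le_iff (L : List String) (k : Int) (hk : k < 3) :
    L.foldl (fun best t => min best (pvRank.getD (PySem.Str.lower t) 3)) 3 ≤ k
      ↔ ∃ t ∈ L, pvRank.getD (PySem.Str.lower t) 3 ≤ k := by
  induction L with
  | nil => simp; omega
  | cons t L ih =>
    have hr := pvRank_le_three (PySem.Str.lower t)
    rw [List.foldl_cons, pv_fold_min L _ (by omega)]
    simp only [List.exists_mem_cons_iff, ← ih]
    have h3 : ¬ (3 : Int) ≤ k := by omega
    rw [min_le_iff, min_le_iff]
    tauto

theorem pv_fold_bounds (L : List String) : ∀ (b : Int), 0 ≤ b → b ≤ 3 →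
    0 ≤ L.foldl (fun best t => min best (pvRank.getD (PySem.Str.lower t) 3)) b
    ∧ L.foldl (fun best t => min best (pvRank.getD (PySem.Str.lower t) 3)) b ≤ 3 := by
  induction L with
  | nil => intro b h0 h3; exact ⟨h0, h3⟩
  | cons t L ih =>
    intro b h0 h3
    have hr0 := pvRank_nonneg (PySem.Str.lower t)
    have hr3 := pvRank_le_three (PySem.Str.lower t)
    rw [List.foldl_cons]
    exact ih _ (by omega) (by omega)

theorem pv_inter_ne_nil (L : List String) (kws : List String) :
    PySem.Set.inter (PySem.Set.ofList (L.map PySem.Str.lower)) (PySem.Set.ofList kws) ≠ []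
      ↔ ∃ t ∈ L, PySem.Str.lower t ∈ kws := by
  rw [← List.isEmpty_eq_false_iff, List.isEmpty_eq_false_iff_exists_mem]
  constructor
  · rintro ⟨x, hx⟩
    rw [PySem.Set.mem_inter _ _ _, PySem.Set.mem_ofList _ _, PySem.Set.mem_ofList _ _, List.mem_map] at hx
    obtain ⟨⟨t, ht, rfl⟩, hk⟩ := hx
    exact ⟨t, ht, hk⟩
  · rintro ⟨t, ht, hk⟩
    exact ⟨PySem.Str.lower t,
      (PySem.Set.mem_inter _ _ _).2 ⟨(PySem.Set.mem_ofList _ _).2 (List.mem_map.2 ⟨t, ht, rfl⟩),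
        (PySem.Set.mem_ofList _ _).2 hk⟩⟩

-- rank thresholds as keyword-list memberships
theorem pv_rank_le_zero (s : String) : pvRank.getD s 3 ≤ 0 ↔ s ∈ pvTheoKws := by
  rw [pvRank_getD]; split_ifs <;> simp_all

theorem pv_rank_le_one (s : String) : pvRank.getD s 3 ≤ 1 ↔ s ∈ pvTheoKws ∨ s ∈ pvHistKws := by
  rw [pvRank_getD]; split_ifs <;> simp_all

theorem pv_rank_le_two (s : String) :
    pvRank.getD s 3 ≤ 2 ↔ s ∈ pvTheoKws ∨ s ∈ pvHistKws ∨ s ∈ pvTextKws := by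
  rw [pvRank_getD]; split_ifs <;> simp_all

theorem infer_contradiction_type_py_spec : Claim_equal_infer_contradiction_type_py := by
  intro L _
  unfold Spec_infer_contradiction_type_py
  unfold infer_contradiction_type_py infer_contradiction_type_py_alt
  simp only []
  set m := L.foldl (fun best t => min best (pvRank.getD (PySem.Str.lower t) 3)) 3 with hm
  obtain ⟨hm0, hm3⟩ := pv_fold_bounds L 3 (by norm_num) (by norm_num)
  simp only [ne_eq, pv_inter_ne_nil]
  by_cases p0 : ∃ t ∈ L, PySem.Str.lower t ∈ pvTheoKws
  · have : m ≤ 0 := (pv_fold_le_iff L 0 (by norm_num)).2 (by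
      obtain ⟨t, ht, hk⟩ := p0
      exact ⟨t, ht, (pv_rank_le_zero _).2 hk⟩)
    have hm_eq : m = 0 := le_antisymm this hm0
    rw [if_pos p0, hm_eq]
    rfl
  · by_cases p1 : ∃ t ∈ L, PySem.Str.lower t ∈ pvHistKws
    · have h1 : m ≤ 1 := (pv_fold_le_iff L 1 (by norm_num)).2 (by
        obtain ⟨t, ht, hk⟩ := p1
        exact ⟨t, ht, (pv_rank_le_one _).2 (Or.inr hk)⟩)
      have h0 : ¬ m ≤ 0 := fun h => by
        obtain ⟨t, ht, hk⟩ := (pv_fold_le_iff L 0 (by norm_num)).1 h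
        exact p0 ⟨t, ht, (pv_rank_le_zero _).1 hk⟩
      have hm_eq : m = 1 := by omega
      rw [if_neg p0, if_pos p1, hm_eq]
      rfl
    · by_cases p2 : ∃ t ∈ L, PySem.Str.lower t ∈ pvTextKws
      · have h2 : m ≤ 2 := (pv_fold_le_iff L 2 (by norm_num)).2 (by
          obtain ⟨t, ht, hk⟩ := p2
          exact ⟨t, ht, (pv_rank_le_two _).2 (Or.inr (Or.inr hk))⟩)
        have h1 : ¬ m ≤ 1 := fun h => by
          obtain ⟨t, ht, hk⟩ := (pv_fold_le_iff L 1 (by norm_num)).1 h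
          rcases (pv_rank_le_one _).1 hk with h | h
          · exact p0 ⟨t, ht, h⟩
          · exact p1 ⟨t, ht, h⟩
        have hm_eq : m = 2 := by omega
        rw [if_neg p0, if_neg p1, if_pos p2, hm_eq]
        rfl
      · have h2 : ¬ m ≤ 2 := fun h => by
          obtain ⟨t, ht, hk⟩ := (pv_fold_le_iff L 2 (by norm_num)).1 h
          rcases (pv_rank_le_two _).1 hk with h | h | h
          · exact p0 ⟨t, ht, h⟩
          · exact p1 ⟨t, ht, h⟩
          · exact p2 ⟨t, ht, h⟩
        have hm_eq : m = 3 := by omega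
        rw [if_neg p0, if_neg p1, if_neg p2, hm_eq]
        rfl
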